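-- pv_equiv track=rewrite | github.com/Diya910/LeetCoach | backend/app/utils/code_utils.py | count_lines_of_code
-- ===== SOURCE A (Python) =====
-- from typing import Dict, Any, Optional, List
--
-- def count_lines_of_code(code: str) -> Dict[str, int]:
--     """
--     Count different types of lines in code.
--
--     Args:
--         code: Source code
--
--     Returns:
--         Dictionary with line counts
--     """
--     lines = code.split('\n')
--
--     total_lines = len(lines)
--     blank_lines = sum(1 for line in lines if not line.strip())
--     comment_lines = 0
--
--     # Count comment lines (basic patterns)
--     for line in lines:
--         stripped = line.strip()
--         if (stripped.startswith('#') or  # Python, shell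
--             stripped.startswith('//') or  # C++, Java, JS
--             stripped.startswith('/*') or stripped.startswith('*')):  # Multi-line comments
--             comment_lines += 1
--
--     code_lines = total_lines - blank_lines - comment_lines
--
--     return {
--         'total': total_lines,
--         'code': code_lines,
--         'blank': blank_lines,
--         'comment': comment_lines
--     }
-- ===== SOURCE B (Python) =====
-- def count_lines_of_code(code: str):
--     """Single pass: strip each line once and classify it; code lines accumulated, total derived."""
--     blank = comment = code_lines = 0
--     for line in code.split('\n'):
--         s = line.strip()
--         if not s:
--             blank += 1
--         elif s.startswith(('#', '//', '/*', '*')):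
--             comment += 1
--         else:
--             code_lines += 1
--     return {
--         'total': blank + comment + code_lines,
--         'code': code_lines,
--         'blank': blank,
--         'comment': comment
--     }
-- ===== Notes on version B (the rewrite author's own statement) =====
-- stated objective: simpler
-- what changed: Replaces A's three separate passes (len, a blank-counting comprehension, a comment-counting loop) plus subtraction with one loop that strips each line once and classifies it into one of three accumulated counters.
import Mathlib
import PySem

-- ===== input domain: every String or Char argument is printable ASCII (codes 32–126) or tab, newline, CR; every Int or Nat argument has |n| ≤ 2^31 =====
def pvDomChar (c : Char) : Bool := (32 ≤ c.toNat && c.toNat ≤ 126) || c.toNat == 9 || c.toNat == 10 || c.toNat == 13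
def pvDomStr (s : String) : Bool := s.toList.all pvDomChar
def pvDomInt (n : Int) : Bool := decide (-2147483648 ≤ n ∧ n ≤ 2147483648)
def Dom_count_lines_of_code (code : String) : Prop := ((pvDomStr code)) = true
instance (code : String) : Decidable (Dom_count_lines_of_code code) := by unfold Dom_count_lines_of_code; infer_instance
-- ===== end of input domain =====

-- B is a single-pass reformulation (strip once, classify into three accumulators); same return value, proved below.
-- ===== PORT A =====
def count_lines_of_code (code : String) : List (String × Int) :=
  let lines := (PySem.Str.split? code "\n").getD []
  let total_lines : Int := PySem.List.len lines
  let blank_lines : Int :=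
    lines.foldl (fun acc line => if PySem.Str.strip line = "" then acc + 1 else acc) 0
  let comment_lines : Int :=
    lines.foldl (fun acc line =>
      let stripped := PySem.Str.strip line
      if PySem.Str.startswith stripped "#" || PySem.Str.startswith stripped "//" ||
         PySem.Str.startswith stripped "/*" || PySem.Str.startswith stripped "*" then
        acc + 1
      else acc) 0
  let code_lines : Int := total_lines - blank_lines - comment_lines
  [("total", total_lines), ("code", code_lines), ("blank", blank_lines), ("comment", comment_lines)]

-- ===== PORT B =====
def count_lines_of_code_alt (code : String) : List (String × Int) :=
  let r : Int × Int × Int :=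
    ((PySem.Str.split? code "\n").getD []).foldl (fun (acc : Int × Int × Int) line =>
      let s := PySem.Str.strip line
      if s = "" then (acc.1 + 1, acc.2.1, acc.2.2)
      else if PySem.Str.startswith s "#" || PySem.Str.startswith s "//" ||
              PySem.Str.startswith s "/*" || PySem.Str.startswith s "*" then
        (acc.1, acc.2.1 + 1, acc.2.2)
      else (acc.1, acc.2.1, acc.2.2 + 1)) (0, 0, 0)
  [("total", r.1 + r.2.1 + r.2.2), ("code", r.2.2), ("blank", r.1), ("comment", r.2.1)]

-- ===== PRECONDITION & SPEC =====
def Spec_count_lines_of_code (code : String) (out : List (String × Int)) : Prop := out = count_lines_of_code_alt code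
instance (code : String) (out : List (String × Int)) : Decidable (Spec_count_lines_of_code code out) := by unfold Spec_count_lines_of_code; infer_instance

-- ===== CLAIM (what is proved, stated in full; the proofs are below) =====
def Claim_equal_count_lines_of_code : Prop := ∀ (code : String), Dom_count_lines_of_code code → Spec_count_lines_of_code code (count_lines_of_code code)

-- ===== LEMMAS AND PROOFS =====

/-- Comment-start test on an (already stripped) line. -/
def pvIsC (s : String) : Bool :=
  PySem.Str.startswith s "#" || PySem.Str.startswith s "//" ||
  PySem.Str.startswith s "/*" || PySem.Str.startswith s "*"

/-- Number of blank lines (strip = ""). -/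
def pvNb : List String → Int
  | [] => 0
  | l :: L => (if PySem.Str.strip l = "" then 1 else 0) + pvNb L

/-- Number of comment lines (A's criterion). -/
def pvNc : List String → Int
  | [] => 0
  | l :: L => (if pvIsC (PySem.Str.strip l) then 1 else 0) + pvNc L

lemma pvIsC_empty : pvIsC "" = false := by decide

lemma foldl_blank (L : List String) (a : Int) :
    L.foldl (fun acc line => if PySem.Str.strip line = "" then acc + 1 else acc) a
      = a + pvNb L := by
  induction L generalizing a with
  | nil => simp [pvNb]
  | cons l L ih => simp only [List.foldl_cons, ih, pvNb]; split_ifs <;> omega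

lemma foldl_comment (L : List String) (a : Int) :
    L.foldl (fun acc line =>
      let stripped := PySem.Str.strip line
      if PySem.Str.startswith stripped "#" || PySem.Str.startswith stripped "//" ||
         PySem.Str.startswith stripped "/*" || PySem.Str.startswith stripped "*" then
        acc + 1
      else acc) a = a + pvNc L := by
  induction L generalizing a with
  | nil => simp [pvNc]
  | cons l L ih => simp only [List.foldl_cons, ih, pvNc, pvIsC]; split_ifs <;> omega

lemma foldl_B (L : List String) (b c k : Int) :
    L.foldl (fun (acc : Int × Int × Int) line =>
      let s := PySem.Str.strip line
      if s = "" then (acc.1 + 1, acc.2.1, acc.2.2)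
      else if PySem.Str.startswith s "#" || PySem.Str.startswith s "//" ||
              PySem.Str.startswith s "/*" || PySem.Str.startswith s "*" then
        (acc.1, acc.2.1 + 1, acc.2.2)
      else (acc.1, acc.2.1, acc.2.2 + 1)) (b, c, k)
      = (b + pvNb L, c + pvNc L, k + ((L.length : Int) - pvNb L - pvNc L)) := by
  induction L generalizing b c k with
  | nil => simp [pvNb, pvNc]
  | cons l L ih =>
    simp only [List.foldl_cons]
    by_cases hb : PySem.Str.strip l = ""
    · have hc : pvIsC (PySem.Str.strip l) = false := by rw [hb]; exact pvIsC_empty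
      rw [if_pos hb, ih]
      simp only [pvNb, pvNc, Prod.ext_iff, List.length_cons, hb, pvIsC_empty,
        Bool.false_eq_true, if_true, if_false]
      refine ⟨?_, ?_, ?_⟩ <;> push_cast <;> omega
    · by_cases hc : pvIsC (PySem.Str.strip l) = true
      · have hc' := hc
        simp only [pvIsC] at hc'
        rw [if_neg hb, if_pos hc', ih]
        simp only [pvNb, pvNc, Prod.ext_iff, List.length_cons, hc, if_neg hb, if_true]
        refine ⟨?_, ?_, ?_⟩ <;> push_cast <;> omega
      · have hc' : pvIsC (PySem.Str.strip l) = false := by simpa using hc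
        have hc2 := hc'
        simp only [pvIsC] at hc2
        rw [if_neg hb, if_neg (by rw [hc2]; exact Bool.false_ne_true), ih]
        simp only [pvNb, pvNc, Prod.ext_iff, List.length_cons, hc', if_neg hb,
          Bool.false_eq_true, if_false]
        refine ⟨?_, ?_, ?_⟩ <;> push_cast <;> omega

-- ===== VERDICT (by name: the statement is the Claim_ definition above) =====
theorem count_lines_of_code_spec : Claim_equal_count_lines_of_code := by
  intro code _
  unfold Spec_count_lines_of_code count_lines_of_code count_lines_of_code_alt
  simp only [foldl_blank, foldl_comment, foldl_B, PySem.List.len_eq, zero_add]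
  simp
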